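-- pv_equiv track=rewrite | github.com/MuhammadAdil006/CompetitiveProgramming | simple/1772B.py | solve
-- ===== SOURCE A (Python) =====
-- def rotate(a):
--     rotated = list(zip(*a[::-1]))
--     return rotated
--
-- def beautiful(a):
--     if a[0][0] < a[0][1] and a[1][0] < a[1][1]:
--         if a[0][0] < a[1][0] and a[0][1] < a[1][1]:
--             return True
--         else:
--             return False
--     else:
--         return False
--
-- def solve(a):
--     if beautiful(a):
--         return "Yes"
--     else:
--         for I in range(3):
--             a = rotate(a)
--             if beautiful(a):
--                 return "Yes"
--         return "No"
-- ===== SOURCE B (Python) =====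
-- def solve(a):
--     m, n = len(a), len(a[0])
--
--     def ok(w, x, y, z):
--         return w < x and y < z and w < y and x < z
--
--     # Test the top-left 2x2 block of each of the four rotations of the grid,
--     # read directly off the corners of the grid itself.
--     if (ok(a[0][0], a[0][1], a[1][0], a[1][1])
--             or ok(a[m-1][0], a[m-2][0], a[m-1][1], a[m-2][1])
--             or ok(a[m-1][n-1], a[m-1][n-2], a[m-2][n-1], a[m-2][n-2])
--             or ok(a[0][n-1], a[1][n-1], a[0][n-2], a[1][n-2])):
--         return "Yes"
--     return "No"
-- ===== Notes on version B (the rewrite author's own statement) =====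
-- stated objective: alternative
-- what changed: Instead of materialising up to three zip-based rotations of the grid and re-testing each, B reads the four corner 2x2 blocks of the grid directly and checks the four orientation conditions in one expression, building no intermediate grids; Pre_ excludes non-rectangular or smaller-than-2x2 grids, on which A's value rests on zip's silent truncation or A raises, and where B raises IndexError.
-- outside the precondition, e.g. on solve([[5, 1, 9], [2, 3]]): A returns 'No', B raises IndexError
import Mathlib
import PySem

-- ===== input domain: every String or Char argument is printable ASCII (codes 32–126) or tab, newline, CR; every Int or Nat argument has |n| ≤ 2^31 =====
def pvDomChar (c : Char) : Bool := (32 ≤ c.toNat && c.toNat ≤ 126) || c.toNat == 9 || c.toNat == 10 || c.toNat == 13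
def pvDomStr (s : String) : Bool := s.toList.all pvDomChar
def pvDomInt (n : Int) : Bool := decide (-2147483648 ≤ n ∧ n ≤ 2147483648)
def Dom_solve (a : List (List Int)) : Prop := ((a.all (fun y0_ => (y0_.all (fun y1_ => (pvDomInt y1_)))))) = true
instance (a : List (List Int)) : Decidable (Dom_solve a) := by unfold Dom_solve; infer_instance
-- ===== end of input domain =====

-- B replaces A's loop of up to three zip-based grid rotations with direct reads of the grid's four corner 2x2 blocks; Pre_ restricts to rectangular grids of at least 2x2 (elsewhere A raises or its value rests on zip's silent truncation, and B raises).


-- ===== PORT A =====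
-- zip(*rows): truncating transpose; fuel is the first row's length (an upper bound on the output length)
def zipStarAux : Nat → List (List Int) → List (List Int)
  | 0, _ => []
  | n+1, rows =>
    if rows.isEmpty || rows.any (·.isEmpty) then []
    else (rows.map (·.headD 0)) :: zipStarAux n (rows.map List.tail)

-- rotate(a) = list(zip(*a[::-1]))
def rotateA (a : List (List Int)) : List (List Int) :=
  zipStarAux (a.reverse.headD []).length a.reverse

-- beautiful(a); the 'none' branches are Python IndexErrors, unreachable under Pre_solve
def beautifulA (a : List (List Int)) : Bool :=
  match PySem.List.pyGet? a 0, PySem.List.pyGet? a 1 with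
  | some r0, some r1 =>
    match PySem.List.pyGet? r0 0, PySem.List.pyGet? r0 1,
          PySem.List.pyGet? r1 0, PySem.List.pyGet? r1 1 with
    | some a00, some a01, some a10, some a11 =>
      if a00 < a01 ∧ a10 < a11 then
        if a00 < a10 ∧ a01 < a11 then true else false
      else false
    | _, _, _, _ => false
  | _, _ => false

-- the 'for I in range(3)' loop with early return
def solveLoopA : Nat → List (List Int) → String
  | 0, _ => "No"
  | n+1, a =>
    let a' := rotateA a
    if beautifulA a' then "Yes" else solveLoopA n a'

def solve (a : List (List Int)) : String :=
  if beautifulA a then "Yes" else solveLoopA 3 a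

-- ===== PORT B =====
def okB (w x y z : Int) : Bool := w < x && y < z && w < y && x < z

-- a[i][j]; the defaults stand for Python IndexErrors, unreachable under Pre_solve
def cellB (a : List (List Int)) (i j : Int) : Int :=
  (PySem.List.pyGet? ((PySem.List.pyGet? a i).getD []) j).getD 0

def solve_alt (a : List (List Int)) : String :=
  let m : Int := a.length
  -- n = len(a[0]); the .getD [] stands for Python's IndexError on an empty a (outside Pre_solve)
  let n : Int := ((PySem.List.pyGet? a 0).getD []).length
  if okB (cellB a 0 0) (cellB a 0 1) (cellB a 1 0) (cellB a 1 1)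
      || okB (cellB a (m-1) 0) (cellB a (m-2) 0) (cellB a (m-1) 1) (cellB a (m-2) 1)
      || okB (cellB a (m-1) (n-1)) (cellB a (m-1) (n-2)) (cellB a (m-2) (n-1)) (cellB a (m-2) (n-2))
      || okB (cellB a 0 (n-1)) (cellB a 1 (n-1)) (cellB a 0 (n-2)) (cellB a 1 (n-2))
  then "Yes" else "No"

-- ===== PRECONDITION & SPEC =====
-- Pre_ = rectangular grid, at least 2 rows and 2 columns. A returns everywhere here. It also excludes
-- non-rectangular grids on which A still returns (zip's silent truncation, or a short-circuited test
-- dodging the IndexError): B naturally raises IndexError there.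
def Pre_solve (a : List (List Int)) : Prop :=
  2 ≤ a.length ∧ 2 ≤ (a.headD []).length ∧
  (a.all (fun r => r.length = (a.headD []).length)) = true
instance (a : List (List Int)) : Decidable (Pre_solve a) := by unfold Pre_solve; infer_instance

def pvWitness_solve : List (List Int) := [[1, 2], [3, 4]]

def Spec_solve (a : List (List Int)) (out : String) : Prop := out = solve_alt a
instance (a : List (List Int)) (out : String) : Decidable (Spec_solve a out) := by unfold Spec_solve; infer_instance

-- ===== CLAIM (what is proved, stated in full; the proofs are below) =====
def Claim_equal_solve : Prop := ∀ (a : List (List Int)), Dom_solve a → Pre_solve a → Spec_solve a (solve a)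

-- ===== LEMMAS AND PROOFS =====

-- minimum row length of a nonempty list of rows (0 for [])
def minL : List (List Int) → Nat
  | [] => 0
  | [r] => r.length
  | r :: s :: t => min r.length (minL (s :: t))

-- the truncating transpose zip(*rows) computes
def T (rows : List (List Int)) : List (List Int) :=
  (List.range (minL rows)).map (fun i => rows.map (fun r => r.getD i 0))

def cellN (g : List (List Int)) (i j : Nat) : Int := (g.getD i []).getD j 0

theorem minL_le_of_mem : ∀ (rows : List (List Int)) (r : List Int), r ∈ rows → minL rows ≤ r.length
  | [r'], r, h => by simp at h; simp [minL, h]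
  | r' :: s :: t, r, h => by
    rcases List.mem_cons.mp h with h | h
    · simp [minL, h]
    · have := minL_le_of_mem (s :: t) r h
      simp [minL]; omega

theorem exists_minL : ∀ (rows : List (List Int)), rows ≠ [] → ∃ r ∈ rows, r.length = minL rows
  | [r], _ => ⟨r, by simp [minL]⟩
  | r :: s :: t, _ => by
    obtain ⟨r', hr', hl⟩ := exists_minL (s :: t) (by simp)
    by_cases h : r.length ≤ minL (s :: t)
    · exact ⟨r, by simp, by simp [minL]; omega⟩
    · exact ⟨r', by simp [List.mem_cons.mp hr'], by simp [minL]; omega⟩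

theorem minL_reverse (rows : List (List Int)) : minL rows.reverse = minL rows := by
  by_cases hcase : rows = []
  · simp [hcase]
  · have h1 : rows.reverse ≠ [] := by simp_all
    have h2 : rows ≠ [] := hcase
    obtain ⟨r, hr, hl⟩ := exists_minL rows.reverse h1
    obtain ⟨r', hr', hl'⟩ := exists_minL rows h2
    have := minL_le_of_mem rows r (List.mem_reverse.mp hr)
    have := minL_le_of_mem rows.reverse r' (List.mem_reverse.mpr hr')
    omega

theorem minL_const (rows : List (List Int)) (n : Nat) (hne : rows ≠ [])
    (h : ∀ r ∈ rows, r.length = n) : minL rows = n := by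
  obtain ⟨r, hr, hl⟩ := exists_minL rows hne
  rw [← hl, h r hr]

theorem minL_tail : ∀ (rows : List (List Int)), (∀ r ∈ rows, r ≠ []) →
    minL (rows.map List.tail) = minL rows - 1
  | [], _ => rfl
  | [r], h => by simp [minL, List.length_tail]
  | r :: s :: t, h => by
    have := minL_tail (s :: t) (fun x hx => h x (List.mem_cons_of_mem _ hx))
    have hr : r ≠ [] := h r (by simp)
    have hst : (s :: t) ≠ [] := by simp
    obtain ⟨r', hr', hl'⟩ := exists_minL (s :: t) hst
    have hr'ne : r' ≠ [] := h r' (List.mem_cons_of_mem _ hr')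
    have h1 : 1 ≤ r.length := List.length_pos_of_ne_nil hr
    have h2 : 1 ≤ minL (s :: t) := by
      have := List.length_pos_of_ne_nil hr'ne; omega
    simp only [List.map_cons, minL, List.length_tail] at *
    omega

theorem zipStarAux_eq : ∀ (fuel : Nat) (rows : List (List Int)), rows ≠ [] →
    minL rows ≤ fuel → zipStarAux fuel rows = T rows
  | 0, rows, _, hf => by
    have : minL rows = 0 := by omega
    simp [zipStarAux, T, this]
  | f + 1, rows, hne, hf => by
    by_cases he : rows.any (·.isEmpty)
    · obtain ⟨r, hr, hre⟩ := List.any_eq_true.mp he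
      have h0 : minL rows = 0 := by
        have := minL_le_of_mem rows r hr
        simp [List.isEmpty_iff] at hre
        simp [hre] at this; omega
      simp [zipStarAux, he, T, h0]
    · have hall : ∀ r ∈ rows, r ≠ [] := by
        intro r hr
        by_contra hc
        exact he (List.any_eq_true.mpr ⟨r, hr, by simp [hc]⟩)
      have htl : minL (rows.map List.tail) = minL rows - 1 := minL_tail rows hall
      have hpos : 1 ≤ minL rows := by
        obtain ⟨r, hr, hl⟩ := exists_minL rows hne
        have := List.length_pos_of_ne_nil (hall r hr); omega
      have ih := zipStarAux_eq f (rows.map List.tail) (by simpa using hne) (by omega)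
      have hk : minL rows = (minL rows - 1) + 1 := by omega
      have hstep : zipStarAux (f + 1) rows =
          if rows.isEmpty || rows.any (·.isEmpty) then []
          else (rows.map (·.headD 0)) :: zipStarAux f (rows.map List.tail) := rfl
      have hcond : (rows.isEmpty || rows.any (·.isEmpty)) = false := by
        rw [Bool.or_eq_false_iff]
        exact ⟨by simp [hne], Bool.eq_false_iff.mpr he⟩
      rw [hstep, hcond, ih]
      simp only [Bool.false_eq_true, if_false]
      conv_rhs => rw [T, hk, List.range_succ_eq_map, List.map_cons]
      congr 1
      · exact List.map_congr_left (fun r hr => by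
          cases r with
          | nil => exact absurd rfl (hall _ hr)
          | cons x xs => rfl)
      · rw [T, htl, List.map_map]
        exact List.map_congr_left (fun i _ => by
          rw [List.map_map]
          exact List.map_congr_left (fun r hr => by
            cases r with
            | nil => exact absurd rfl (hall _ hr)
            | cons x xs => simp [List.getD]))

theorem rotateA_eq (a : List (List Int)) (hne : a ≠ []) : rotateA a = T a.reverse := by
  have hrne : a.reverse ≠ [] := by simpa using hne
  have hmem : a.reverse.headD [] ∈ a.reverse := by
    cases h : a.reverse with
    | nil => exact absurd h hrne
    | cons x xs => simp
  exact zipStarAux_eq _ _ hrne (minL_le_of_mem _ _ hmem)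

theorem T_length (rows : List (List Int)) : (T rows).length = minL rows := by simp [T]

theorem T_row_length (rows : List (List Int)) (r : List Int) (h : r ∈ T rows) :
    r.length = rows.length := by
  simp only [T, List.mem_map] at h
  obtain ⟨i, _, rfl⟩ := h
  simp

theorem getD_mem {α : Type} (l : List α) (n : Nat) (d : α) (h : n < l.length) :
    l.getD n d ∈ l := by
  rw [List.getD_eq_getElem?_getD, List.getElem?_eq_getElem h]
  exact List.getElem_mem h

theorem cellN_T (rows : List (List Int)) (i j : Nat) (hi : i < minL rows)
    (hj : j < rows.length) : cellN (T rows) i j = cellN rows j i := by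
  unfold cellN T
  have h1 : (List.map (fun i => rows.map (fun r => r.getD i 0)) (List.range (minL rows))).getD i []
      = rows.map (fun r => r.getD i 0) := by
    rw [List.getD_eq_getElem?_getD, List.getElem?_map, List.getElem?_range hi]
    rfl
  rw [h1, List.getD_eq_getElem?_getD, List.getElem?_map, List.getElem?_eq_getElem hj]
  simp [List.getD_eq_getElem?_getD, List.getElem?_eq_getElem hj]

theorem getD_reverse (rows : List (List Int)) (j : Nat) (hj : j < rows.length) :
    rows.reverse.getD j [] = rows.getD (rows.length - 1 - j) [] := by
  rw [List.getD_eq_getElem?_getD, List.getD_eq_getElem?_getD, List.getElem?_reverse hj]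

theorem cellN_rotate (g : List (List Int)) (hne : g ≠ []) (i j : Nat)
    (hi : i < minL g) (hj : j < g.length) :
    cellN (rotateA g) i j = cellN g (g.length - 1 - j) i := by
  rw [rotateA_eq g hne, cellN_T g.reverse i j (by rwa [minL_reverse]) (by simpa using hj)]
  simp only [cellN]
  rw [getD_reverse g j hj]

theorem rotateA_length (g : List (List Int)) (hne : g ≠ []) :
    (rotateA g).length = minL g := by
  rw [rotateA_eq g hne, T_length, minL_reverse]

theorem rotateA_row_length (g : List (List Int)) (hne : g ≠ []) (r : List Int)
    (h : r ∈ rotateA g) : r.length = g.length := by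
  rw [rotateA_eq g hne] at h
  simpa using T_row_length g.reverse r h

theorem beautifulA_eq (g : List (List Int)) (h2 : 2 ≤ g.length)
    (h0 : 2 ≤ (g.getD 0 []).length) (h1 : 2 ≤ (g.getD 1 []).length) :
    beautifulA g = okB (cellN g 0 0) (cellN g 0 1) (cellN g 1 0) (cellN g 1 1) := by
  match g, h2 with
  | r0 :: r1 :: rest, _ =>
    simp only [List.getD] at h0 h1
    match r0, h0, r1, h1 with
    | w :: x :: _, _, y :: z :: _, _ =>
      simp [beautifulA, cellN, okB, PySem.List.pyGet?, PySem.List.pyIdx?]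
      split_ifs <;> simp_all <;> first | omega | simp [Bool.and_assoc]

-- cell bridge: B's Python-indexed cellB equals cellN at in-range Nat indices
theorem cellB_nat (a : List (List Int)) (i : Nat) (hi : i < a.length) (j : Nat)
    (_hj : j < (a.getD i []).length) : cellB a (i : Int) (j : Int) = cellN a i j := by
  simp only [cellB, cellN, PySem.List.pyGet?_natCast]
  rw [List.getElem?_eq_getElem hi]
  simp [List.getD_eq_getElem?_getD, List.getElem?_eq_getElem hi]

-- ===== VERDICT (by name: the statement is the Claim_ definition above) =====
theorem solve_spec : Claim_equal_solve := by
  intro a _ hpre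
  obtain ⟨hm, hn0, hrect'⟩ := hpre
  set M := a.length with hMdef
  set N := (a.headD []).length with hNdef
  have hrect : ∀ r ∈ a, r.length = N := by
    intro r hr; have := List.all_eq_true.mp hrect' r hr; simpa using this
  have hne : a ≠ [] := by intro h; rw [hMdef, h] at hm; simp at hm
  have hK : minL a = N := minL_const a N hne hrect
  have hN2 : 2 ≤ N := hn0
  have hM2 : 2 ≤ M := hm
  have hlen : ∀ i, i < M → (a.getD i []).length = N := by
    intro i hi; exact hrect _ (getD_mem a i [] hi)
  -- the rotation chain
  have ha1len : (rotateA a).length = N := by rw [rotateA_length a hne, hK]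
  have ha1rows : ∀ r ∈ rotateA a, r.length = M := fun r hr => rotateA_row_length a hne r hr
  have ha1ne : rotateA a ≠ [] := by
    intro h; rw [h] at ha1len; simp at ha1len; omega
  have ha1min : minL (rotateA a) = M := minL_const _ M ha1ne ha1rows
  have ha2len : (rotateA (rotateA a)).length = M := by
    rw [rotateA_length _ ha1ne, ha1min]
  have ha2rows : ∀ r ∈ rotateA (rotateA a), r.length = N := fun r hr => by
    rw [rotateA_row_length _ ha1ne r hr, ha1len]
  have ha2ne : rotateA (rotateA a) ≠ [] := by
    intro h; rw [h] at ha2len; simp at ha2len; omega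
  have ha2min : minL (rotateA (rotateA a)) = N := minL_const _ N ha2ne ha2rows
  have ha3len : (rotateA (rotateA (rotateA a))).length = N := by
    rw [rotateA_length _ ha2ne, ha2min]
  have ha3rows : ∀ r ∈ rotateA (rotateA (rotateA a)), r.length = M := fun r hr => by
    rw [rotateA_row_length _ ha2ne r hr, ha2len]
  have ha3ne : rotateA (rotateA (rotateA a)) ≠ [] := by
    intro h; rw [h] at ha3len; simp at ha3len; omega
  -- cell formulas for the three rotations
  have c1 : ∀ i j, i < N → j < M → cellN (rotateA a) i j = cellN a (M - 1 - j) i := by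
    intro i j hi hj
    exact cellN_rotate a hne i j (by rwa [hK]) hj
  have c2 : ∀ i j, i < M → j < N → cellN (rotateA (rotateA a)) i j = cellN a (M - 1 - i) (N - 1 - j) := by
    intro i j hi hj
    rw [cellN_rotate (rotateA a) ha1ne i j (by rwa [ha1min]) (by rwa [ha1len]), ha1len]
    exact c1 (N - 1 - j) i (by omega) hi
  have c3 : ∀ i j, i < N → j < M → cellN (rotateA (rotateA (rotateA a))) i j = cellN a j (N - 1 - i) := by
    intro i j hi hj
    rw [cellN_rotate (rotateA (rotateA a)) ha2ne i j (by rwa [ha2min]) (by rwa [ha2len]), ha2len]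
    rw [c2 (M - 1 - j) i (by omega) hi]
    congr 1
    omega
  -- beautiful of each grid in the chain, as okB of cells of a
  have row2 : ∀ (g : List (List Int)) (n : Nat), 2 ≤ g.length → (∀ r ∈ g, r.length = n) →
      2 ≤ n → (2 ≤ (g.getD 0 []).length ∧ 2 ≤ (g.getD 1 []).length) := by
    intro g n hg hr hn
    constructor
    · rw [hr _ (getD_mem g 0 [] (by omega))]; exact hn
    · rw [hr _ (getD_mem g 1 [] (by omega))]; exact hn
  have hb0 : beautifulA a = okB (cellN a 0 0) (cellN a 0 1) (cellN a 1 0) (cellN a 1 1) := by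
    have e0 : (a.getD 0 []).length = N := hlen 0 (by omega)
    have e1 : (a.getD 1 []).length = N := hlen 1 (by omega)
    exact beautifulA_eq a hM2 (by omega) (by omega)
  have hb1 : beautifulA (rotateA a) =
      okB (cellN a (M - 1) 0) (cellN a (M - 2) 0) (cellN a (M - 1) 1) (cellN a (M - 2) 1) := by
    obtain ⟨g0, g1⟩ := row2 (rotateA a) M (by omega) ha1rows hM2
    rw [beautifulA_eq (rotateA a) (by omega) g0 g1,
      c1 0 0 (by omega) (by omega), c1 0 1 (by omega) (by omega),
      c1 1 0 (by omega) (by omega), c1 1 1 (by omega) (by omega)]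
    have e1 : M - 1 - 0 = M - 1 := by omega
    have e2 : M - 1 - 1 = M - 2 := by omega
    rw [e1, e2]
  have hb2 : beautifulA (rotateA (rotateA a)) =
      okB (cellN a (M - 1) (N - 1)) (cellN a (M - 1) (N - 2))
          (cellN a (M - 2) (N - 1)) (cellN a (M - 2) (N - 2)) := by
    obtain ⟨g0, g1⟩ := row2 (rotateA (rotateA a)) N (by omega) ha2rows hN2
    rw [beautifulA_eq _ (by omega) g0 g1,
      c2 0 0 (by omega) (by omega), c2 0 1 (by omega) (by omega),
      c2 1 0 (by omega) (by omega), c2 1 1 (by omega) (by omega)]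
    have e1 : M - 1 - 0 = M - 1 := by omega
    have e2 : M - 1 - 1 = M - 2 := by omega
    have e3 : N - 1 - 0 = N - 1 := by omega
    have e4 : N - 1 - 1 = N - 2 := by omega
    rw [e1, e2, e3, e4]
  have hb3 : beautifulA (rotateA (rotateA (rotateA a))) =
      okB (cellN a 0 (N - 1)) (cellN a 1 (N - 1)) (cellN a 0 (N - 2)) (cellN a 1 (N - 2)) := by
    obtain ⟨g0, g1⟩ := row2 (rotateA (rotateA (rotateA a))) M (by omega) ha3rows hM2
    rw [beautifulA_eq _ (by omega) g0 g1,
      c3 0 0 (by omega) (by omega), c3 0 1 (by omega) (by omega),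
      c3 1 0 (by omega) (by omega), c3 1 1 (by omega) (by omega)]
    have e3 : N - 1 - 0 = N - 1 := by omega
    have e4 : N - 1 - 1 = N - 2 := by omega
    rw [e3, e4]
  -- A's program as the four-way if-chain
  have hA : solve a =
      if beautifulA a then "Yes"
      else if beautifulA (rotateA a) then "Yes"
      else if beautifulA (rotateA (rotateA a)) then "Yes"
      else if beautifulA (rotateA (rotateA (rotateA a))) then "Yes"
      else "No" := rfl
  -- B's program: the length bridges and the sixteen cell bridges
  have hrow0 : (PySem.List.pyGet? a 0).getD [] = a.headD [] := by
    cases a with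
    | nil => exact absurd rfl hne
    | cons r t => simp [PySem.List.pyGet?, PySem.List.pyIdx?]
  have bn : ∀ i j : Nat, i < M → j < N → cellB a (i : Int) (j : Int) = cellN a i j := by
    intro i j hi hj
    exact cellB_nat a i hi j (by rw [hlen i hi]; omega)
  have em1 : (M : Int) - 1 = ((M - 1 : Nat) : Int) := by omega
  have em2 : (M : Int) - 2 = ((M - 2 : Nat) : Int) := by omega
  have en1 : (N : Int) - 1 = ((N - 1 : Nat) : Int) := by omega
  have en2 : (N : Int) - 2 = ((N - 2 : Nat) : Int) := by omega
  have hB : solve_alt a =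
      if okB (cellN a 0 0) (cellN a 0 1) (cellN a 1 0) (cellN a 1 1)
          || okB (cellN a (M - 1) 0) (cellN a (M - 2) 0) (cellN a (M - 1) 1) (cellN a (M - 2) 1)
          || okB (cellN a (M - 1) (N - 1)) (cellN a (M - 1) (N - 2)) (cellN a (M - 2) (N - 1)) (cellN a (M - 2) (N - 2))
          || okB (cellN a 0 (N - 1)) (cellN a 1 (N - 1)) (cellN a 0 (N - 2)) (cellN a 1 (N - 2))
      then "Yes" else "No" := by
    simp only [solve_alt]
    rw [hrow0, ← hMdef, ← hNdef, em1, em2, en1, en2]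
    have n0 : (0 : Int) = ((0 : Nat) : Int) := rfl
    have n1 : (1 : Int) = ((1 : Nat) : Int) := rfl
    rw [show cellB a 0 0 = cellN a 0 0 by rw [n0]; exact bn 0 0 (by omega) (by omega),
      show cellB a 0 1 = cellN a 0 1 by rw [n0, n1]; exact bn 0 1 (by omega) (by omega),
      show cellB a 1 0 = cellN a 1 0 by rw [n0, n1]; exact bn 1 0 (by omega) (by omega),
      show cellB a 1 1 = cellN a 1 1 by rw [n1]; exact bn 1 1 (by omega) (by omega),
      show cellB a ((M - 1 : Nat) : Int) 0 = cellN a (M - 1) 0 by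
        rw [n0]; exact bn (M - 1) 0 (by omega) (by omega),
      show cellB a ((M - 2 : Nat) : Int) 0 = cellN a (M - 2) 0 by
        rw [n0]; exact bn (M - 2) 0 (by omega) (by omega),
      show cellB a ((M - 1 : Nat) : Int) 1 = cellN a (M - 1) 1 by
        rw [n1]; exact bn (M - 1) 1 (by omega) (by omega),
      show cellB a ((M - 2 : Nat) : Int) 1 = cellN a (M - 2) 1 by
        rw [n1]; exact bn (M - 2) 1 (by omega) (by omega),
      show cellB a ((M - 1 : Nat) : Int) ((N - 1 : Nat) : Int) = cellN a (M - 1) (N - 1) from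
        bn (M - 1) (N - 1) (by omega) (by omega),
      show cellB a ((M - 1 : Nat) : Int) ((N - 2 : Nat) : Int) = cellN a (M - 1) (N - 2) from
        bn (M - 1) (N - 2) (by omega) (by omega),
      show cellB a ((M - 2 : Nat) : Int) ((N - 1 : Nat) : Int) = cellN a (M - 2) (N - 1) from
        bn (M - 2) (N - 1) (by omega) (by omega),
      show cellB a ((M - 2 : Nat) : Int) ((N - 2 : Nat) : Int) = cellN a (M - 2) (N - 2) from
        bn (M - 2) (N - 2) (by omega) (by omega),
      show cellB a 0 ((N - 1 : Nat) : Int) = cellN a 0 (N - 1) by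
        rw [n0]; exact bn 0 (N - 1) (by omega) (by omega),
      show cellB a 1 ((N - 1 : Nat) : Int) = cellN a 1 (N - 1) by
        rw [n1]; exact bn 1 (N - 1) (by omega) (by omega),
      show cellB a 0 ((N - 2 : Nat) : Int) = cellN a 0 (N - 2) by
        rw [n0]; exact bn 0 (N - 2) (by omega) (by omega),
      show cellB a 1 ((N - 2 : Nat) : Int) = cellN a 1 (N - 2) by
        rw [n1]; exact bn 1 (N - 2) (by omega) (by omega)]
  -- assemble: an if-chain equals the if of the disjunction
  show solve a = solve_alt a
  rw [hA, hB, hb0, hb1, hb2, hb3]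
  generalize okB (cellN a 0 0) (cellN a 0 1) (cellN a 1 0) (cellN a 1 1) = b0
  generalize okB (cellN a (M - 1) 0) (cellN a (M - 2) 0) (cellN a (M - 1) 1) (cellN a (M - 2) 1) = b1
  generalize okB (cellN a (M - 1) (N - 1)) (cellN a (M - 1) (N - 2)) (cellN a (M - 2) (N - 1)) (cellN a (M - 2) (N - 2)) = b2
  generalize okB (cellN a 0 (N - 1)) (cellN a 1 (N - 1)) (cellN a 0 (N - 2)) (cellN a 1 (N - 2)) = b3
  cases b0 <;> cases b1 <;> cases b2 <;> cases b3 <;> simp
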